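-- pv_equiv track=rewrite | github.com/sashaobucina/interview_prep | python/medium/heap/merge_m_sorted_lists.py | merge_m_sorted_lists
-- ===== SOURCE A (Python) =====
-- import heapq
--
-- class Node:
--   def __init__(self, val, list_num, index=0):
--     self.val = val
--     self.list_num = list_num
--     self.index = index
--
--   def _is_valid_operand(self, other):
--     return (hasattr(other, "val") and hasattr(other, "list_num") and hasattr(other, "index"))
--
--   def __eq__(self, other):
--     if not self._is_valid_operand(other):
--       return NotImplemented
--     return (self.val == other.val)
--
--   def __lt__(self, other):
--     if not self._is_valid_operand(other):
--       return NotImplemented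
--     return (self.val < other.val)
--
--   def __str__(self) -> str:
--     return "{0} ".format(self.val)
--
-- def merge_m_sorted_lists(lists: list) -> list:
--   res = []
--   heap = []
--   for i, list in enumerate(lists):
--     if len(list) > 0:
--       heapq.heappush(heap, Node(list[0], i, 0))
--
--   while len(heap) > 0:
--     minNode = heapq.heappop(heap)
--     res.append(minNode.val)
--
--     if minNode.index + 1 < len(lists[minNode.list_num]):
--       minNode.index = minNode.index + 1
--       minNode.val = lists[minNode.list_num][minNode.index]
--       heapq.heappush(heap, minNode)
--
--   return res
-- ===== SOURCE B (Python) =====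
-- def merge_two(a, b):
--     i = 0
--     j = 0
--     out = []
--     while i < len(a) and j < len(b):
--         if a[i] <= b[j]:
--             out.append(a[i])
--             i += 1
--         else:
--             out.append(b[j])
--             j += 1
--     out.extend(a[i:])
--     out.extend(b[j:])
--     return out
--
-- def merge_m_sorted_lists(lists: list) -> list:
--     arrs = list(lists)
--     if not arrs:
--         return []
--     while len(arrs) > 1:
--         arrs = [merge_two(arrs[k], arrs[k + 1]) if k + 1 < len(arrs) else arrs[k]
--                 for k in range(0, len(arrs), 2)]
--     return arrs[0]
-- ===== Notes on version B (the rewrite author's own statement) =====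
-- stated objective: alternative
-- what changed: Replaces the heap of per-list cursor nodes (heapq with a Node class) by divide-and-conquer pairwise merging: a two-pointer merge_two folds the list-of-lists together in rounds until one list remains.
-- outside the precondition, e.g. on merge_m_sorted_lists([[1, 2, 3, 1], [0, 3]]): A returns [0, 1, 2, 3, 3, 1], B returns [0, 1, 2, 3, 1, 3]
import Mathlib
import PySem

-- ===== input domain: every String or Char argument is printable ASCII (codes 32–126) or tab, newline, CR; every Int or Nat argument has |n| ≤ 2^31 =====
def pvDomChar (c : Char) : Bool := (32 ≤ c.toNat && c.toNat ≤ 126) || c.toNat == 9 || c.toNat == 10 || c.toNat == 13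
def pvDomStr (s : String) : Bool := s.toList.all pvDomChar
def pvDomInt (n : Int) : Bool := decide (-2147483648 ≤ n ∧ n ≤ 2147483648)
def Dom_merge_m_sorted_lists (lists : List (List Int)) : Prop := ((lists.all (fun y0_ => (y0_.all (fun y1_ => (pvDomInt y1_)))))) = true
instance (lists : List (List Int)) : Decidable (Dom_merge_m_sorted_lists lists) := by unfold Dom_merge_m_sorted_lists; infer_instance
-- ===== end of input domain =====

-- B replaces A's heapq-of-cursor-nodes k-way merge by divide-and-conquer pairwise merging
-- (a two-pointer merge of two lists, folded over the list of lists in rounds): an alternative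
-- decomposition of similar cost. Pre_ restricts to lists whose members are each sorted.


-- ===== PORT A =====
-- A node of A's heap: (val, list_num, index); list_num/index are the nonnegative Python ints
-- produced by enumerate / index+1, kept as Nat.
-- The heapq library calls are ported as an abstract min-priority queue kept as a val-sorted
-- list: heappush = ordered insertion (a new node goes after equal vals, like heapq's sift
-- with Node.__lt__ strict on val), heappop = take the head.  This is exact for the RETURNED
-- value on Pre_ (each list sorted): both always pop a node of minimal val.
def pvHeapPush (n : Int × Nat × Nat) : List (Int × Nat × Nat) → List (Int × Nat × Nat)
  | [] => [n]
  | m :: t => if n.1 < m.1 then n :: m :: t else m :: pvHeapPush n t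

-- total number of not-yet-emitted elements referenced by the heap (termination measure)
def pvRemaining (lists : List (List Int)) (h : List (Int × Nat × Nat)) : Nat :=
  h.foldr (fun n acc => ((lists.getD n.2.1 []).length - n.2.2) + acc) 0

theorem pvHeapPush_length (n : Int × Nat × Nat) (h : List (Int × Nat × Nat)) :
    (pvHeapPush n h).length = h.length + 1 := by
  induction h with
  | nil => simp [pvHeapPush]
  | cons m t ih => simp only [pvHeapPush]; split; · simp_all
                   · simp_all

theorem pvRemaining_push (lists : List (List Int)) (n : Int × Nat × Nat)
    (h : List (Int × Nat × Nat)) :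
    pvRemaining lists (pvHeapPush n h)
      = ((lists.getD n.2.1 []).length - n.2.2) + pvRemaining lists h := by
  induction h with
  | nil => simp [pvHeapPush, pvRemaining]
  | cons m t ih =>
      simp only [pvHeapPush]
      split
      · simp [pvRemaining]
      · simp [pvRemaining] at ih ⊢; omega

-- the while-loop of A: pop the min node, emit its val, re-push the advanced cursor
def pvLoopA (lists : List (List Int)) (heap : List (Int × Nat × Nat)) : List Int :=
  match heap with
  | [] => []
  | n :: rest =>
      if hc : n.2.2 + 1 < (lists.getD n.2.1 []).length then
        -- minNode.index += 1; minNode.val = lists[list_num][index]; heappush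
        n.1 :: pvLoopA lists
          (pvHeapPush ((lists.getD n.2.1 []).getD (n.2.2 + 1) 0, n.2.1, n.2.2 + 1) rest)
      else
        n.1 :: pvLoopA lists rest
  termination_by pvRemaining lists heap + heap.length
  decreasing_by
  · have h1 := pvRemaining_push lists ((lists.getD n.2.1 []).getD (n.2.2 + 1) 0, n.2.1, n.2.2 + 1) rest
    have h2 := pvHeapPush_length ((lists.getD n.2.1 []).getD (n.2.2 + 1) 0, n.2.1, n.2.2 + 1) rest
    have h3 : pvRemaining lists (n :: rest)
        = ((lists.getD n.2.1 []).length - n.2.2) + pvRemaining lists rest := by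
      simp [pvRemaining]
    rw [h1, h2, h3]
    simp only [List.length_cons]
    omega
  · have h3 : pvRemaining lists (n :: rest)
        = ((lists.getD n.2.1 []).length - n.2.2) + pvRemaining lists rest := by
      simp [pvRemaining]
    rw [h3]
    simp only [List.length_cons]
    omega

-- the initial for-loop over enumerate(lists); enumerate indices are ≥ 0, .toNat is exact
def pvInitHeap (lists : List (List Int)) : List (Int × Nat × Nat) :=
  (PySem.List.enumerate lists).foldl
    (fun h p => if p.2.length > 0 then pvHeapPush (p.2.getD 0 0, p.1.toNat, 0) h else h) []

def merge_m_sorted_lists (lists : List (List Int)) : List Int :=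
  pvLoopA lists (pvInitHeap lists)

-- ===== PORT B =====
-- two-pointer merge of two lists (Source B's merge_two, recursion on the two suffixes)
def pvMergeTwo : List Int → List Int → List Int
  | [], b => b
  | a, [] => a
  | x :: a, y :: b => if x ≤ y then x :: pvMergeTwo a (y :: b) else y :: pvMergeTwo (x :: a) b

-- one round: merge adjacent pairs (the comprehension over range(0, len, 2))
def pvPairPass : List (List Int) → List (List Int)
  | a :: b :: t => pvMergeTwo a b :: pvPairPass t
  | l => l

theorem pvPairPass_length_le (l : List (List Int)) : (pvPairPass l).length ≤ l.length := by
  fun_induction pvPairPass l <;> (simp_all; try omega)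

-- the while len(arrs) > 1 loop
def pvMergeAll : List (List Int) → List Int
  | [] => []
  | [a] => a
  | a :: b :: t => pvMergeAll (pvPairPass (a :: b :: t))
  termination_by l => l.length
  decreasing_by
    have := pvPairPass_length_le t
    simp only [pvPairPass, List.length_cons]
    omega

def merge_m_sorted_lists_alt (lists : List (List Int)) : List Int :=
  pvMergeAll lists

-- ===== PRECONDITION & SPEC =====
-- Pre_ admits every input whose member lists are each sorted non-decreasingly, and also any
-- input with at most one nonempty member (nothing to interleave).  It excludes only inputs
-- with two or more nonempty lists one of which is unsorted: "merge m sorted lists" is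
-- unspecified there, and A's heap-pop interleaving of unsorted lists is an accident of its
-- implementation as much as B's pairwise-merge interleaving is of B's.
def Pre_merge_m_sorted_lists (lists : List (List Int)) : Prop :=
  lists.countP (fun l => !l.isEmpty) ≤ 1 ∨ ∀ l ∈ lists, l.Pairwise (· ≤ ·)
instance (lists : List (List Int)) : Decidable (Pre_merge_m_sorted_lists lists) := by
  unfold Pre_merge_m_sorted_lists; infer_instance

def pvWitness_merge_m_sorted_lists : List (List Int) := [[1, 3], [2], [], [0, 0, 5]]

def Spec_merge_m_sorted_lists (lists : List (List Int)) (out : List Int) : Prop := out = merge_m_sorted_lists_alt lists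
instance (lists : List (List Int)) (out : List Int) : Decidable (Spec_merge_m_sorted_lists lists out) := by unfold Spec_merge_m_sorted_lists; infer_instance

-- ===== CLAIM (what is proved, stated in full; the proofs are below) =====
def Claim_equal_merge_m_sorted_lists : Prop := ∀ (lists : List (List Int)), Dom_merge_m_sorted_lists lists → Pre_merge_m_sorted_lists lists → Spec_merge_m_sorted_lists lists (merge_m_sorted_lists lists)

-- ===== LEMMAS AND PROOFS =====

-- the suffix of its list a heap node stands for
def pvNodeTail (lists : List (List Int)) (n : Int × Nat × Nat) : List Int :=
  (lists.getD n.2.1 []).drop n.2.2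

-- heap well-formedness: val-sorted, and every node is a live in-range cursor
def pvInv (lists : List (List Int)) (h : List (Int × Nat × Nat)) : Prop :=
  h.Pairwise (fun a b => a.1 ≤ b.1) ∧
  ∀ n ∈ h, n.2.1 < lists.length ∧ n.2.2 < (lists.getD n.2.1 []).length ∧
    (lists.getD n.2.1 []).getD n.2.2 0 = n.1

theorem pvHeapPush_perm (n : Int × Nat × Nat) (h : List (Int × Nat × Nat)) :
    (pvHeapPush n h).Perm (n :: h) := by
  induction h with
  | nil => simp [pvHeapPush]
  | cons m t ih =>
      simp only [pvHeapPush]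
      split
      · exact List.Perm.refl _
      · exact (ih.cons m).trans (List.Perm.swap _ _ _)

theorem pvHeapPush_pairwise (n : Int × Nat × Nat) (h : List (Int × Nat × Nat))
    (hs : h.Pairwise (fun a b => a.1 ≤ b.1)) :
    (pvHeapPush n h).Pairwise (fun a b => a.1 ≤ b.1) := by
  induction h with
  | nil => simp [pvHeapPush]
  | cons m t ih =>
      rw [List.pairwise_cons] at hs
      simp only [pvHeapPush]
      split
      · rename_i hlt
        rw [List.pairwise_cons]
        refine ⟨?_, List.pairwise_cons.mpr hs⟩
        intro a ha
        rcases List.mem_cons.mp ha with rfl | ha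
        · omega
        · have := hs.1 a ha; omega
      · rename_i hge
        rw [List.pairwise_cons]
        refine ⟨?_, ih hs.2⟩
        intro a ha
        rcases List.mem_cons.mp ((pvHeapPush_perm n t).mem_iff.mp ha) with rfl | h'
        · omega
        · exact hs.1 a h'

-- sorted list: head bounds every member
theorem sorted_head_le {c : Int} {t : List Int} (hs : (c :: t).Pairwise (· ≤ ·)) :
    ∀ z ∈ c :: t, c ≤ z := by
  intro z hz
  rcases List.mem_cons.mp hz with rfl | hz
  · exact le_refl _
  · exact (List.pairwise_cons.mp hs).1 z hz

theorem pvHeapPush_mem {m n : Int × Nat × Nat} {h : List (Int × Nat × Nat)}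
    (hm : m ∈ pvHeapPush n h) : m = n ∨ m ∈ h :=
  List.mem_cons.mp ((pvHeapPush_perm n h).mem_iff.mp hm)

-- the list a well-formed node points into is one of the input lists, hence sorted
theorem pvNode_list_sorted (lists : List (List Int))
    (hall : ∀ l ∈ lists, l.Pairwise (· ≤ ·)) {n : Int × Nat × Nat}
    (h1 : n.2.1 < lists.length) : (lists.getD n.2.1 []).Pairwise (· ≤ ·) := by
  rw [List.getD_eq_getElem lists [] h1]
  exact hall _ (List.getElem_mem h1)

theorem pvNodeTail_cons (lists : List (List Int)) {n : Int × Nat × Nat}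
    (h2 : n.2.2 < (lists.getD n.2.1 []).length)
    (h3 : (lists.getD n.2.1 []).getD n.2.2 0 = n.1) :
    pvNodeTail lists n = n.1 :: (lists.getD n.2.1 []).drop (n.2.2 + 1) := by
  unfold pvNodeTail
  rw [List.drop_eq_getElem_cons h2]
  congr 1
  rw [← h3, List.getD_eq_getElem _ 0 h2]

theorem pvNodeTail_sorted (lists : List (List Int))
    (hall : ∀ l ∈ lists, l.Pairwise (· ≤ ·)) {n : Int × Nat × Nat}
    (h1 : n.2.1 < lists.length) : (pvNodeTail lists n).Pairwise (· ≤ ·) :=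
  (pvNode_list_sorted lists hall h1).sublist (List.drop_sublist _ _)

-- every element of a live node's suffix is ≥ its val
theorem pvTail_bound (lists : List (List Int))
    (hall : ∀ l ∈ lists, l.Pairwise (· ≤ ·)) {n : Int × Nat × Nat}
    (h1 : n.2.1 < lists.length) (h2 : n.2.2 < (lists.getD n.2.1 []).length)
    (h3 : (lists.getD n.2.1 []).getD n.2.2 0 = n.1) :
    ∀ z ∈ pvNodeTail lists n, n.1 ≤ z := by
  have hs := pvNodeTail_sorted lists hall h1 (n := n)
  rw [pvNodeTail_cons lists h2 h3] at hs ⊢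
  exact sorted_head_le hs

-- the main loop invariant: result is sorted and a permutation of the pending suffixes
theorem pvLoopA_spec (lists : List (List Int))
    (hall : ∀ l ∈ lists, l.Pairwise (· ≤ ·)) :
    ∀ h : List (Int × Nat × Nat), pvInv lists h →
      (pvLoopA lists h).Pairwise (· ≤ ·) ∧
      (pvLoopA lists h).Perm (h.map (pvNodeTail lists)).flatten := by
  intro h
  fun_induction pvLoopA lists h with
  | case1 => intro _; simp
  | case2 n rest hc ih =>
      intro hinv
      obtain ⟨hpw, hnodes⟩ := hinv
      obtain ⟨hn1, hn2, hn3⟩ := hnodes n (by simp)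
      set L := lists.getD n.2.1 [] with hL
      set n' : Int × Nat × Nat := (L.getD (n.2.2 + 1) 0, n.2.1, n.2.2 + 1) with hn'
      rw [List.pairwise_cons] at hpw
      -- invariant for the pushed heap
      have hinv' : pvInv lists (pvHeapPush n' rest) := by
        refine ⟨pvHeapPush_pairwise n' rest hpw.2, ?_⟩
        intro m hm
        rcases pvHeapPush_mem hm with rfl | hm
        · exact ⟨hn1, hc, rfl⟩
        · exact hnodes m (by simp [hm])
      obtain ⟨hsR, hpR⟩ := ih hinv'
      -- the pushed node's suffix is the tail of n's suffix
      have htail : pvNodeTail lists n = n.1 :: pvNodeTail lists n' := by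
        rw [pvNodeTail_cons lists hn2 hn3]
        rfl
      have hflat : ((pvHeapPush n' rest).map (pvNodeTail lists)).flatten.Perm
          (pvNodeTail lists n' ++ (rest.map (pvNodeTail lists)).flatten) := by
        simpa using ((pvHeapPush_perm n' rest).map (pvNodeTail lists)).flatten
      constructor
      case _ => -- sortedness of n.1 :: recursive result
        refine List.pairwise_cons.mpr ⟨?_, hsR⟩
        intro z hz
        have hz' := (hpR.trans hflat).mem_iff.mp hz
        rcases List.mem_append.mp hz' with hz' | hz'
        · -- z sits in the tail of n's own list
          have := sorted_head_le (htail ▸ pvNodeTail_sorted lists hall hn1 (n := n))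
          exact this z (by rw [htail] at *; simp [hz'])
        · -- z sits in some other node's suffix
          obtain ⟨l, hl, hzl⟩ := List.mem_flatten.mp hz'
          obtain ⟨m, hm, rfl⟩ := List.mem_map.mp hl
          obtain ⟨hm1, hm2, hm3⟩ := hnodes m (by simp [hm])
          exact le_trans (hpw.1 m hm) (pvTail_bound lists hall hm1 hm2 hm3 z hzl)
      case _ => -- the emitted val heads the permutation of the pending suffixes
        simp only [List.map_cons, List.flatten_cons, htail, List.cons_append]
        exact (hpR.trans hflat).cons n.1
  | case3 n rest hc ih =>
      intro hinv
      obtain ⟨hpw, hnodes⟩ := hinv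
      obtain ⟨hn1, hn2, hn3⟩ := hnodes n (by simp)
      rw [List.pairwise_cons] at hpw
      have hinv' : pvInv lists rest := ⟨hpw.2, fun m hm => hnodes m (by simp [hm])⟩
      obtain ⟨hsR, hpR⟩ := ih hinv'
      -- n's suffix is the single element [n.1]
      have htail : pvNodeTail lists n = [n.1] := by
        rw [pvNodeTail_cons lists hn2 hn3, List.drop_eq_nil_of_le (by omega)]
      constructor
      case _ =>
        refine List.pairwise_cons.mpr ⟨?_, hsR⟩
        intro z hz
        obtain ⟨l, hl, hzl⟩ := List.mem_flatten.mp (hpR.mem_iff.mp hz)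
        obtain ⟨m, hm, rfl⟩ := List.mem_map.mp hl
        obtain ⟨hm1, hm2, hm3⟩ := hnodes m (by simp [hm])
        exact le_trans (hpw.1 m hm) (pvTail_bound lists hall hm1 hm2 hm3 z hzl)
      case _ =>
        simp only [List.map_cons, List.flatten_cons, htail, List.cons_append, List.nil_append]
        exact hpR.cons n.1

-- characterization of Python's enumerate: each pair is (i, lists[i])
theorem pvEnum_spec (ls : List (List Int)) : ∀ (s : Nat) (p : Int × List Int),
    p ∈ PySem.List.enumerate ls (s : Int) →
    ∃ i : Nat, s ≤ i ∧ p.1 = (i : Int) ∧ i - s < ls.length ∧ ls.getD (i - s) [] = p.2 := by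
  induction ls with
  | nil => intro s p hp; simp [PySem.List.enumerate] at hp
  | cons x t ih =>
      intro s p hp
      simp only [PySem.List.enumerate, List.mem_cons] at hp
      rcases hp with rfl | hp
      · exact ⟨s, le_refl _, rfl, by simp, by simp⟩
      · have : ((s : Int) + 1) = ((s + 1 : Nat) : Int) := by push_cast; ring
        rw [this] at hp
        obtain ⟨i, hsi, h1, h2, h3⟩ := ih (s + 1) p hp
        refine ⟨i, by omega, h1, by simp; omega, ?_⟩
        have : i - s = (i - (s + 1)) + 1 := by omega
        rw [this]
        simpa using h3

theorem pvEnum_map (ls : List (List Int)) : ∀ s : Int,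
    (PySem.List.enumerate ls s).map Prod.snd = ls := by
  induction ls with
  | nil => intro s; simp [PySem.List.enumerate]
  | cons x t ih => intro s; simp [PySem.List.enumerate, ih]

-- invariant of the initial for-loop: the heap is well-formed and holds exactly the lists seen
theorem pvInitFold (lists : List (List Int)) :
    ∀ (pairs : List (Int × List Int)) (acc : List (Int × Nat × Nat)),
      (∀ p ∈ pairs, p.1.toNat < lists.length ∧ lists.getD p.1.toNat [] = p.2) →
      pvInv lists acc →
      pvInv lists (pairs.foldl
        (fun h p => if p.2.length > 0 then pvHeapPush (p.2.getD 0 0, p.1.toNat, 0) h else h) acc) ∧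
      ((pairs.foldl
        (fun h p => if p.2.length > 0 then pvHeapPush (p.2.getD 0 0, p.1.toNat, 0) h else h) acc).map
          (pvNodeTail lists)).flatten.Perm
        ((acc.map (pvNodeTail lists)).flatten ++ (pairs.map Prod.snd).flatten) := by
  intro pairs
  induction pairs with
  | nil => intro acc _ hinv; refine ⟨hinv, ?_⟩; simp
  | cons p ps ih =>
      intro acc hps hinv
      simp only [List.foldl_cons]
      by_cases hp2 : p.2.length > 0
      · have hp := hps p (by simp)
        set n₀ : Int × Nat × Nat := (p.2.getD 0 0, p.1.toNat, 0) with hn₀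
        have hinv' : pvInv lists (pvHeapPush n₀ acc) := by
          refine ⟨pvHeapPush_pairwise n₀ acc hinv.1, ?_⟩
          intro m hm
          rcases pvHeapPush_mem hm with rfl | hm
          · refine ⟨hp.1, ?_, ?_⟩
            · show 0 < (lists.getD p.1.toNat []).length
              rw [hp.2]; exact hp2
            · show (lists.getD p.1.toNat []).getD 0 0 = p.2.getD 0 0
              rw [hp.2]
          · exact hinv.2 m hm
        have htail₀ : pvNodeTail lists n₀ = p.2 := by
          show (lists.getD p.1.toNat []).drop 0 = p.2
          rw [hp.2, List.drop_zero]
        obtain ⟨hI, hP⟩ := ih (pvHeapPush n₀ acc) (fun q hq => hps q (by simp [hq])) hinv'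
        rw [if_pos hp2]
        refine ⟨hI, ?_⟩
        have hpush : ((pvHeapPush n₀ acc).map (pvNodeTail lists)).flatten.Perm
            (p.2 ++ (acc.map (pvNodeTail lists)).flatten) := by
          have := ((pvHeapPush_perm n₀ acc).map (pvNodeTail lists)).flatten
          simpa [htail₀] using this
        refine (hP.trans ((hpush.append_right _).trans ?_))
        simp only [List.map_cons, List.flatten_cons, List.append_assoc]
        calc (p.2 ++ ((acc.map (pvNodeTail lists)).flatten ++ (ps.map Prod.snd).flatten)).Perm
              ((acc.map (pvNodeTail lists)).flatten ++ (p.2 ++ (ps.map Prod.snd).flatten)) := by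
              rw [← List.append_assoc, ← List.append_assoc]
              exact List.perm_append_comm.append_right _ |>.trans (by rw [List.append_assoc])
          _ = _ := rfl
      · have hp20 : p.2 = [] := List.length_eq_zero_iff.mp (by omega)
        rw [if_neg hp2]
        obtain ⟨hI, hP⟩ := ih acc (fun q hq => hps q (by simp [hq])) hinv
        exact ⟨hI, hP.trans (by simp [hp20])⟩

theorem pvInitHeap_spec (lists : List (List Int)) :
    pvInv lists (pvInitHeap lists) ∧
    ((pvInitHeap lists).map (pvNodeTail lists)).flatten.Perm lists.flatten := by
  have h0 : ∀ p ∈ PySem.List.enumerate lists (0 : Int),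
      p.1.toNat < lists.length ∧ lists.getD p.1.toNat [] = p.2 := by
    intro p hp
    obtain ⟨i, _, h1, h2, h3⟩ := pvEnum_spec lists 0 p hp
    simp only [Nat.sub_zero] at h2 h3
    rw [h1]
    simpa using ⟨h2, h3⟩
  obtain ⟨hI, hP⟩ := pvInitFold lists (PySem.List.enumerate lists (0 : Int)) []
    h0 ⟨List.Pairwise.nil, by simp⟩
  refine ⟨hI, hP.trans ?_⟩
  rw [pvEnum_map]
  simp

-- B side
theorem pvMergeTwo_perm (a b : List Int) : (pvMergeTwo a b).Perm (a ++ b) := by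
  fun_induction pvMergeTwo a b with
  | case1 => simp
  | case2 => simp
  | case3 x a y b hxy ih => simpa using ih.cons x
  | case4 x a y b hxy ih =>
      exact (ih.cons y).trans List.perm_middle.symm

theorem pvMergeTwo_pairwise (a b : List Int) (ha : a.Pairwise (· ≤ ·))
    (hb : b.Pairwise (· ≤ ·)) : (pvMergeTwo a b).Pairwise (· ≤ ·) := by
  fun_induction pvMergeTwo a b with
  | case1 => exact hb
  | case2 => exact ha
  | case3 x a y b hxy ih =>
      rw [List.pairwise_cons] at ha
      refine List.pairwise_cons.mpr ⟨?_, ih ha.2 hb⟩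
      intro z hz
      rcases List.mem_append.mp ((pvMergeTwo_perm a (y :: b)).mem_iff.mp hz) with h' | h'
      · exact ha.1 z h'
      · exact le_trans hxy (sorted_head_le hb z h')
  | case4 x a y b hxy ih =>
      rw [List.pairwise_cons] at hb
      refine List.pairwise_cons.mpr ⟨?_, ih ha hb.2⟩
      intro z hz
      rcases List.mem_append.mp ((pvMergeTwo_perm (x :: a) b).mem_iff.mp hz) with h' | h'
      · exact le_trans (le_of_not_ge hxy) (sorted_head_le ha z h')
      · exact hb.1 z h'

theorem pvPairPass_flatten_perm (l : List (List Int)) :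
    (pvPairPass l).flatten.Perm l.flatten := by
  fun_induction pvPairPass l with
  | case1 a b t ih =>
      simp only [List.flatten_cons, ← List.append_assoc]
      exact List.Perm.append ((pvMergeTwo_perm a b)) ih
  | case2 => exact List.Perm.refl _

theorem pvPairPass_sorted (l : List (List Int)) (h : ∀ x ∈ l, x.Pairwise (· ≤ ·)) :
    ∀ x ∈ pvPairPass l, x.Pairwise (· ≤ ·) := by
  fun_induction pvPairPass l with
  | case1 a b t ih =>
      intro x hx
      rcases List.mem_cons.mp hx with rfl | hx
      · exact pvMergeTwo_pairwise a b (h a (by simp)) (h b (by simp))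
      · exact ih (fun y hy => h y (by simp [hy])) x hx
  | case2 => exact h

theorem pvMergeAll_spec (l : List (List Int)) (h : ∀ x ∈ l, x.Pairwise (· ≤ ·)) :
    (pvMergeAll l).Pairwise (· ≤ ·) ∧ (pvMergeAll l).Perm l.flatten := by
  fun_induction pvMergeAll l with
  | case1 => simp
  | case2 a => simpa using h a (by simp)
  | case3 a b t ih =>
      obtain ⟨hs, hp⟩ := ih (pvPairPass_sorted _ h)
      exact ⟨hs, hp.trans (pvPairPass_flatten_perm _)⟩

-- ---- the "at most one nonempty list" case: both sides return the concatenation ----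

-- a heap holding a single cursor emits its list's suffix in order
theorem pvLoopA_single (lists : List (List Int)) : ∀ (fuel : Nat) (n : Int × Nat × Nat),
    n.2.2 < (lists.getD n.2.1 []).length →
    (lists.getD n.2.1 []).getD n.2.2 0 = n.1 →
    (lists.getD n.2.1 []).length - n.2.2 = fuel + 1 →
    pvLoopA lists [n] = pvNodeTail lists n := by
  intro fuel
  induction fuel with
  | zero =>
      intro n h2 h3 hf
      rw [pvLoopA, dif_neg (by omega)]
      rw [pvNodeTail_cons lists h2 h3, List.drop_eq_nil_of_le (by omega), pvLoopA]
  | succ k ih =>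
      intro n h2 h3 hf
      have hc : n.2.2 + 1 < (lists.getD n.2.1 []).length := by omega
      rw [pvLoopA, dif_pos hc]
      have : pvHeapPush ((lists.getD n.2.1 []).getD (n.2.2 + 1) 0, n.2.1, n.2.2 + 1) ([] : List (Int × Nat × Nat))
          = [((lists.getD n.2.1 []).getD (n.2.2 + 1) 0, n.2.1, n.2.2 + 1)] := rfl
      rw [this, ih _ hc rfl (by show (lists.getD n.2.1 []).length - (n.2.2 + 1) = k + 1; omega),
        pvNodeTail_cons lists h2 h3]
      rfl

theorem pvFold_all_empty (acc : List (Int × Nat × Nat)) :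
    ∀ pairs : List (Int × List Int), (∀ p ∈ pairs, p.2 = []) →
    pairs.foldl
      (fun h p => if p.2.length > 0 then pvHeapPush (p.2.getD 0 0, p.1.toNat, 0) h else h) acc
      = acc := by
  intro pairs
  induction pairs generalizing acc with
  | nil => intro _; rfl
  | cons p ps ih =>
      intro hall
      have hp : p.2 = [] := hall p (by simp)
      simp only [List.foldl_cons, hp]
      exact ih acc (fun q hq => hall q (by simp [hq]))

-- with at most one nonempty pair, the initial heap is empty or a single fresh cursor
theorem pvFold_small (lists : List (List Int)) :
    ∀ pairs : List (Int × List Int),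
      (∀ p ∈ pairs, p.1.toNat < lists.length ∧ lists.getD p.1.toNat [] = p.2) →
      pairs.countP (fun p => !p.2.isEmpty) ≤ 1 →
      (pairs.foldl
        (fun h p => if p.2.length > 0 then pvHeapPush (p.2.getD 0 0, p.1.toNat, 0) h else h) []
        = [] ∧ (pairs.map Prod.snd).flatten = []) ∨
      (∃ n : Int × Nat × Nat,
        pairs.foldl
          (fun h p => if p.2.length > 0 then pvHeapPush (p.2.getD 0 0, p.1.toNat, 0) h else h) []
          = [n] ∧ n.2.2 < (lists.getD n.2.1 []).length ∧
        (lists.getD n.2.1 []).getD n.2.2 0 = n.1 ∧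
        pvNodeTail lists n = (pairs.map Prod.snd).flatten) := by
  intro pairs
  induction pairs with
  | nil => intro _ _; left; simp
  | cons p ps ih =>
      intro hps hcnt
      by_cases hp2 : p.2 = []
      · simp only [List.foldl_cons, hp2, List.length_nil, gt_iff_lt, lt_irrefl, if_false]
        have := ih (fun q hq => hps q (by simp [hq]))
          (le_trans (by simp [hp2]) hcnt)
        simpa [hp2] using this
      · -- p is the single nonempty pair: every later pair is empty
        have hcnt0 : ps.countP (fun p => !p.2.isEmpty) = 0 := by
          rw [List.countP_cons_of_pos (by simp [hp2])] at hcnt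
          omega
        have hemp : ∀ q ∈ ps, q.2 = [] := by
          intro q hq
          have := List.countP_eq_zero.mp hcnt0 q hq
          simpa using this
        have hp := hps p (by simp)
        have hlen : p.2.length > 0 := by
          cases hq : p.2 with
          | nil => exact absurd hq hp2
          | cons a t => simp
        right
        refine ⟨(p.2.getD 0 0, p.1.toNat, 0), ?_, ?_, ?_, ?_⟩
        · simp only [List.foldl_cons, if_pos hlen]
          exact pvFold_all_empty _ ps hemp
        · show 0 < (lists.getD p.1.toNat []).length
          rw [hp.2]; exact hlen
        · show (lists.getD p.1.toNat []).getD 0 0 = p.2.getD 0 0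
          rw [hp.2]
        · show (lists.getD p.1.toNat []).drop 0 = _
          rw [hp.2, List.drop_zero]
          have : (ps.map Prod.snd).flatten = [] := by
            rw [List.flatten_eq_nil_iff]
            intro l hl
            obtain ⟨q, hq, rfl⟩ := List.mem_map.mp hl
            exact hemp q hq
          simp [this]

theorem pvA_small (lists : List (List Int))
    (h : lists.countP (fun l => !l.isEmpty) ≤ 1) :
    merge_m_sorted_lists lists = lists.flatten := by
  unfold merge_m_sorted_lists pvInitHeap
  have hpairs : ∀ p ∈ PySem.List.enumerate lists (0 : Int),
      p.1.toNat < lists.length ∧ lists.getD p.1.toNat [] = p.2 := by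
    intro p hp
    obtain ⟨i, _, h1, h2, h3⟩ := pvEnum_spec lists 0 p hp
    simp only [Nat.sub_zero] at h2 h3
    rw [h1]
    simpa using ⟨h2, h3⟩
  have hcnt : (PySem.List.enumerate lists (0 : Int)).countP (fun p => !p.2.isEmpty) ≤ 1 := by
    have hh := h
    rw [← pvEnum_map lists 0, List.countP_map] at hh
    exact hh
  rcases pvFold_small lists (PySem.List.enumerate lists (0 : Int)) hpairs hcnt with
    ⟨hfold, hflat⟩ | ⟨n, hfold, h2, h3, h4⟩
  · rw [hfold, pvLoopA]
    have hle : lists.flatten = [] := by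
      rw [← pvEnum_map lists 0]
      exact hflat
    rw [hle]
  · rw [hfold, pvLoopA_single lists ((lists.getD n.2.1 []).length - n.2.2 - 1) n h2 h3 (by omega),
      h4, pvEnum_map]

theorem pvMergeTwo_nil_right (a : List Int) : pvMergeTwo a [] = a := by
  cases a with
  | nil => simp [pvMergeTwo]
  | cons x t => simp [pvMergeTwo]

theorem pvPairPass_small (l : List (List Int))
    (h : l.countP (fun x => !x.isEmpty) ≤ 1) :
    (pvPairPass l).flatten = l.flatten ∧
    (pvPairPass l).countP (fun x => !x.isEmpty) ≤ l.countP (fun x => !x.isEmpty) := by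
  fun_induction pvPairPass l with
  | case1 a b t ih =>
      cases a with
      | nil =>
          have ht : t.countP (fun x => !x.isEmpty) ≤ 1 := by
            simp only [List.countP_cons] at h
            omega
          obtain ⟨ihf, ihc⟩ := ih ht
          refine ⟨?_, ?_⟩
          · simp [pvMergeTwo, ihf]
          · simp only [pvMergeTwo, List.countP_cons] at ihc ⊢
            simp
            omega
      | cons x ta =>
          have hb : b = [] := by
            by_contra hb
            rw [List.countP_cons_of_pos (by simp), List.countP_cons_of_pos (by simp [hb])] at h
            omega
          subst hb
          have ht : t.countP (fun x => !x.isEmpty) ≤ 1 := by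
            simp only [List.countP_cons] at h
            omega
          obtain ⟨ihf, ihc⟩ := ih ht
          refine ⟨?_, ?_⟩
          · rw [pvMergeTwo_nil_right]
            simp [ihf]
          · rw [pvMergeTwo_nil_right]
            simp only [List.countP_cons] at ihc ⊢
            simp
            omega
  | case2 l hl => exact ⟨rfl, le_refl _⟩

theorem pvB_small (lists : List (List Int))
    (h : lists.countP (fun l => !l.isEmpty) ≤ 1) :
    merge_m_sorted_lists_alt lists = lists.flatten := by
  unfold merge_m_sorted_lists_alt
  fun_induction pvMergeAll lists with
  | case1 => rfl
  | case2 a => simp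
  | case3 a b t ih =>
      obtain ⟨hf, hc⟩ := pvPairPass_small _ h
      rw [ih (le_trans hc h), hf]

-- ===== VERDICT (by name: the statement is the Claim_ definition above) =====
theorem merge_m_sorted_lists_spec : Claim_equal_merge_m_sorted_lists := by
  intro lists _ hpre
  unfold Spec_merge_m_sorted_lists
  rcases hpre with hsmall | hall
  · rw [pvA_small lists hsmall, pvB_small lists hsmall]
  · unfold merge_m_sorted_lists merge_m_sorted_lists_alt
    obtain ⟨hinv, hperm⟩ := pvInitHeap_spec lists
    obtain ⟨hsA, hpA⟩ := pvLoopA_spec lists hall _ hinv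
    obtain ⟨hsB, hpB⟩ := pvMergeAll_spec lists hall
    exact List.eq_of_perm_of_sorted (fun a b _ _ h1 h2 => le_antisymm h1 h2) hsA hsB
      ((hpA.trans hperm).trans hpB.symm)
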